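-- pv_equiv track=rewrite | github.com/gustavocaixetarosa/automacao_nfe | tratar_dados.py | tratar_linha
-- ===== SOURCE A (Python) =====
-- def tratar_linha(linha):
--     linha_boa = []
--     for celula in linha:
--         if celula != "":
--             linha_boa.append(celula)
--     linha_reduzida = [elemento.strip() for elemento in linha_boa]
--
--     queremos = [0, 2, 3, 10]
--
--     linha_ideal = []
--
--     for i, celula in enumerate(linha_reduzida):
--         if i in queremos:
--             if i == 2:
--                 celula = celula.split('-')[0]
--             linha_ideal.append(celula)
--
--     return linha_ideal
-- ===== SOURCE B (Python) =====
-- def tratar_linha(linha):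
--     linha_ideal = []
--     i = 0
--     for celula in linha:
--         if celula == "":
--             continue
--         if i > 10:
--             break
--         if i == 0 or i == 3 or i == 10:
--             linha_ideal.append(celula.strip())
--         elif i == 2:
--             linha_ideal.append(celula.strip().split('-')[0])
--         i += 1
--     return linha_ideal
-- ===== Notes on version B (the rewrite author's own statement) =====
-- stated objective: faster
-- what changed: B fuses A's three staged passes (filter, map-strip, enumerate-and-select with a membership test per cell) into one single pass that keeps a running non-empty-cell counter, strips and selects on the fly, and breaks out of the loop as soon as the counter passes the last wanted index 10.
import Mathlib
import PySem

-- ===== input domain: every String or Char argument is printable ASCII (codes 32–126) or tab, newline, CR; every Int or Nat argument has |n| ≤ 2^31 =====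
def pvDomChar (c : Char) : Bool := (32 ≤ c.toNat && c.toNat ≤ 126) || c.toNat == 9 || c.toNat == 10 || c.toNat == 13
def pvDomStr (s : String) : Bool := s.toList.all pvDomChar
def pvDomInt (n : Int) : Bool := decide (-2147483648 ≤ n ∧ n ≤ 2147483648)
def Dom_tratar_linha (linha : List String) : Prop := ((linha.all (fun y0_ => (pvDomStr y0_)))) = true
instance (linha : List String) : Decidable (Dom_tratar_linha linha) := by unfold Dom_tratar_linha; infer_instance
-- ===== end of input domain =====

-- B fuses A's three staged passes into ONE pass with a running non-empty-cell counter and an early break past index 10, measured faster (objective: faster).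

-- shared primitive for the `.split('-')[0]` expression both Pythons contain
def splitDashHead (c : String) : String := ((PySem.Str.split? c "-").getD []).getD 0 ""

-- ===== PORT A =====
def tratar_linha (linha : List String) : List String :=
  let linha_boa := linha.foldl (fun acc celula => if celula ≠ "" then acc ++ [celula] else acc) []
  let linha_reduzida := linha_boa.map (fun elemento => PySem.Str.strip elemento)
  let queremos : List Int := [0, 2, 3, 10]
  (PySem.List.enumerate linha_reduzida).foldl
    (fun acc p =>
      if p.1 ∈ queremos then
        acc ++ [if p.1 = 2 then splitDashHead p.2 else p.2]
      else acc) []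

-- ===== PORT B =====
-- the single fused loop of Source B: `continue` on "", `break` past 10, strip+select inline
def tratarGo : List String → Nat → List String
  | [], _ => []
  | celula :: rest, i =>
      if celula = "" then tratarGo rest i
      else if 10 < i then []
      else if i = 0 ∨ i = 3 ∨ i = 10 then PySem.Str.strip celula :: tratarGo rest (i + 1)
      else if i = 2 then splitDashHead (PySem.Str.strip celula) :: tratarGo rest (i + 1)
      else tratarGo rest (i + 1)

def tratar_linha_alt (linha : List String) : List String := tratarGo linha 0

-- ===== PRECONDITION & SPEC =====
def Spec_tratar_linha (linha : List String) (out : List String) : Prop := out = tratar_linha_alt linha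
instance (linha : List String) (out : List String) : Decidable (Spec_tratar_linha linha out) := by unfold Spec_tratar_linha; infer_instance

-- ===== CLAIM =====
def Claim_equal_tratar_linha : Prop := ∀ (linha : List String), Dom_tratar_linha linha → Spec_tratar_linha linha (tratar_linha linha)

-- ===== LEMMAS AND PROOFS =====

-- proof-only characterisation: selection by index over an already-cleaned list
def selGo : List String → Nat → List String
  | [], _ => []
  | y :: t, i =>
      if 10 < i then []
      else if i = 0 ∨ i = 3 ∨ i = 10 then y :: selGo t (i + 1)
      else if i = 2 then splitDashHead y :: selGo t (i + 1)
      else selGo t (i + 1)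

lemma tratarGo_eq (linha : List String) : ∀ i,
    tratarGo linha i = selGo ((linha.filter (fun c => c ≠ "")).map PySem.Str.strip) i := by
  induction linha with
  | nil => intro i; rfl
  | cons c rest ih =>
      intro i
      by_cases hc : c = ""
      · simp [tratarGo, hc, ih]
      · rw [List.filter_cons_of_pos (by simp [hc]), List.map_cons]
        simp only [tratarGo, if_neg hc, selGo]
        split_ifs <;> simp [ih]

-- A's selection loop never appends once the index is past 10
lemma enum_fold_const (t : List String) : ∀ (s : Int) (acc : List String), 11 ≤ s →
    (PySem.List.enumerate t s).foldl
      (fun acc p =>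
        if p.1 ∈ ([0, 2, 3, 10] : List Int) then
          acc ++ [if p.1 = 2 then splitDashHead p.2 else p.2]
        else acc) acc = acc := by
  induction t with
  | nil => intro s acc _; simp [PySem.List.enumerate]
  | cons x xs ih =>
      intro s acc hs
      rw [PySem.List.enumerate_cons]
      have hmem : s ∉ ([0, 2, 3, 10] : List Int) := by
        simp only [List.mem_cons, List.not_mem_nil, or_false]
        omega
      simp only [List.foldl_cons, if_neg hmem]
      exact ih (s + 1) acc (by omega)

-- selGo returns nothing past index 10
lemma selGo_high (t : List String) (i : Nat) (h : 10 < i) : selGo t i = [] := by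
  cases t <;> simp [selGo, h]

-- the two selection strategies agree on any cleaned list ys (fold generalised over start index and accumulator)
lemma fold_sel (ys : List String) : ∀ (s : Nat) (acc : List String),
    (PySem.List.enumerate ys (s : Int)).foldl
      (fun acc p =>
        if p.1 ∈ ([0, 2, 3, 10] : List Int) then
          acc ++ [if p.1 = 2 then splitDashHead p.2 else p.2]
        else acc) acc = acc ++ selGo ys s := by
  induction ys with
  | nil => intro s acc; simp [PySem.List.enumerate, selGo]
  | cons y t ih =>
      intro s acc
      rw [PySem.List.enumerate_cons, List.foldl_cons]
      have hcast : ((s : Int) + 1) = ((s + 1 : Nat) : Int) := by push_cast; ring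
      have hmem : ((s : Int) ∈ ([0, 2, 3, 10] : List Int)) ↔ (s = 0 ∨ s = 2 ∨ s = 3 ∨ s = 10) := by
        simp only [List.mem_cons, List.not_mem_nil, or_false]
        omega
      by_cases h10 : 10 < s
      · rw [if_neg (by rw [hmem]; omega), selGo_high (y :: t) s h10, hcast,
          enum_fold_const t _ acc (by push_cast; omega)]
        simp
      · by_cases hsel : s = 0 ∨ s = 3 ∨ s = 10
        · have hs2 : ¬ s = 2 := by omega
          rw [if_pos (by rw [hmem]; omega), if_neg (by show ¬ ((s : Int) = 2); omega),
            hcast, ih]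
          simp [selGo, h10, hsel]
        · by_cases hs2 : s = 2
          · subst hs2
            rw [if_pos (by rw [hmem]; omega), if_pos (by show ((2 : Nat) : Int) = 2; norm_num),
              hcast, ih]
            simp [selGo]
          · rw [if_neg (by rw [hmem]; omega), hcast, ih]
            simp [selGo, h10, hs2, hsel]

-- ===== VERDICT =====
theorem tratar_linha_spec : Claim_equal_tratar_linha := by
  intro linha _
  unfold Spec_tratar_linha tratar_linha tratar_linha_alt
  rw [show (fun (acc : List String) celula => if celula ≠ "" then acc ++ [celula] else acc)
        = (fun acc x => if (x ≠ "" : Bool) then acc ++ [id x] else acc) by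
        funext acc x; simp]
  rw [PySem.List.foldl_append_if]
  simp only [List.nil_append, List.map_id]
  rw [tratarGo_eq]
  have := fold_sel ((linha.filter (fun c => c ≠ "")).map PySem.Str.strip) 0 []
  simpa using this
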